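-- pv_equiv track=rewrite | github.com/Sumit-kj/PracticeProblems | src/running_median.py | get_insert_index_binary
-- ===== SOURCE A (Python) =====
-- def get_insert_index_binary(a, e):
--     """
--     To get the index using binary search
--     :param a: sorted array
--     :param e: element
--     :return: index
--     """
--
--     low = 0
--     high = len(a) - 1
--     while low <= high:
--         mid = (high + low) // 2
--         if a[mid] < e:
--             low = mid + 1
--         elif a[mid] > e:
--             high = mid - 1
--         else:
--             return mid
--     return len(a)
-- ===== SOURCE B (Python) =====
-- def get_insert_index_binary(a, e):
--     """
--     Recursive divide-and-conquer on list slices: search the middle element of the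
--     current sub-list, recurse into the matching half, carrying the offset of the
--     sub-list inside a; None (mapped to len(a)) signals a miss.
--     """
--     def search(sub, off):
--         if not sub:
--             return None
--         m = (len(sub) - 1) // 2
--         x = sub[m]
--         if x < e:
--             return search(sub[m + 1:], off + m + 1)
--         if x > e:
--             return search(sub[:m], off)
--         return off + m
--     r = search(a, 0)
--     return len(a) if r is None else r
-- ===== Notes on version B (the rewrite author's own statement) =====
-- stated objective: alternative
-- what changed: Replaced the in-place low/high while-loop with a recursive divide-and-conquer on list slices carrying an explicit offset, signalling a miss with None instead of tracking bounds.
import Mathlib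
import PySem

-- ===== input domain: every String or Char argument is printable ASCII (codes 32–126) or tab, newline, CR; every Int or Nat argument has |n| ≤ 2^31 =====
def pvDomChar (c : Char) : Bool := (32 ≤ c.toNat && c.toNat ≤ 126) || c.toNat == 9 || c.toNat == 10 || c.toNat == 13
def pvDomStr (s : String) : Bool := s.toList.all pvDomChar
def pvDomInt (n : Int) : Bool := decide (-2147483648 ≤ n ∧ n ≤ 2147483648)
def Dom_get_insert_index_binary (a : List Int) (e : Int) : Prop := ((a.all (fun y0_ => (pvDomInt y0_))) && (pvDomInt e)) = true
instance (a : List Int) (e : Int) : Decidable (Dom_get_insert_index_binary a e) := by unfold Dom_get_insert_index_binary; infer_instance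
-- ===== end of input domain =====

-- B replaces the in-place low/high while-loop by a recursive divide-and-conquer on
-- list slices with an explicit offset (miss = None); an alternative of equal behaviour.


-- ===== PORT A =====
-- the while-loop of A, state (low, high); `mid = (high + low) // 2` written out at
-- each use.  The `fuel` argument only makes the recursion structural: every
-- iteration shrinks the window [low, high] by at least one, so the initial fuel
-- len(a) + 1 is never exhausted (the 0-case and the `none` arm of a[mid] are
-- unreachable from get_insert_index_binary).
def pvA_loop (a : List Int) (e : Int) : Nat → Int → Int → Int
  | 0, _, _ => 0
  | fuel + 1, low, high =>
    if low ≤ high then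
      match PySem.List.pyGet? a (PySem.Int.floordiv (high + low) 2) with
      | none => 0
      | some x =>
        if x < e then pvA_loop a e fuel (PySem.Int.floordiv (high + low) 2 + 1) high
        else if x > e then pvA_loop a e fuel low (PySem.Int.floordiv (high + low) 2 - 1)
        else PySem.Int.floordiv (high + low) 2
    else (a.length : Int)

def get_insert_index_binary (a : List Int) (e : Int) : Int :=
  pvA_loop a e (a.length + 1) 0 ((a.length : Int) - 1)

-- ===== PORT B =====
-- Source B's inner `search(sub, off)`: recursion on slices, `m = (len(sub) - 1) // 2`
-- written out at each use.  `fuel` only makes the recursion structural: each call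
-- strictly shrinks sub, so fuel len(a) + 1 is never exhausted, and sub[m] is in
-- range whenever sub ≠ [] (the 0-case and the `none` arm are unreachable).
def pvB_search (e : Int) : Nat → List Int → Int → Option Int
  | 0, _, _ => none
  | fuel + 1, sub, off =>
    if sub = [] then none
    else
      match PySem.List.pyGet? sub (PySem.Int.floordiv ((sub.length : Int) - 1) 2) with
      | none => none
      | some x =>
        if x < e then
          pvB_search e fuel
            (PySem.List.slice sub (some (PySem.Int.floordiv ((sub.length : Int) - 1) 2 + 1)) none)
            (off + PySem.Int.floordiv ((sub.length : Int) - 1) 2 + 1)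
        else if x > e then
          pvB_search e fuel
            (PySem.List.slice sub none (some (PySem.Int.floordiv ((sub.length : Int) - 1) 2))) off
        else some (off + PySem.Int.floordiv ((sub.length : Int) - 1) 2)

def get_insert_index_binary_alt (a : List Int) (e : Int) : Int :=
  match pvB_search e (a.length + 1) a 0 with
  | none => (a.length : Int)
  | some r => r

-- ===== PRECONDITION & SPEC =====
def Spec_get_insert_index_binary (a : List Int) (e : Int) (out : Int) : Prop := out = get_insert_index_binary_alt a e
instance (a : List Int) (e : Int) (out : Int) : Decidable (Spec_get_insert_index_binary a e out) := by unfold Spec_get_insert_index_binary; infer_instance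

-- ===== CLAIM (what is proved, stated in full; the proofs are below) =====
def Claim_equal_get_insert_index_binary : Prop := ∀ (a : List Int) (e : Int), Dom_get_insert_index_binary a e → Spec_get_insert_index_binary a e (get_insert_index_binary a e)

-- ===== LEMMAS AND PROOFS =====

-- main invariant: A's loop on window [low, high] equals B's search on the slice
-- a[low : high+1] with offset low (miss mapped to len a), for any sufficient fuels
theorem pvA_loop_eq_search (a : List Int) (e : Int) :
    ∀ (n fa fb : Nat) (low high : Int), (high + 1 - low).toNat = n →
      n < fa → n < fb →
      0 ≤ low → low ≤ high + 1 → high < (a.length : Int) →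
      pvA_loop a e fa low high =
        (match pvB_search e fb ((a.drop low.toNat).take (high + 1 - low).toNat) low with
         | none => (a.length : Int)
         | some r => r) := by
  intro n
  induction n using Nat.strong_induction_on with
  | _ n ih =>
    intro fa fb low high hn hfa hfb h0 hlh hhl
    match fa, fb with
    | fa + 1, fb + 1 =>
    by_cases h : low ≤ high
    · -- window nonempty
      set sub := (a.drop low.toNat).take (high + 1 - low).toNat with hsub
      have hsublen : sub.length = (high + 1 - low).toNat := by
        rw [hsub, List.length_take, List.length_drop]; omega
      have hsubne : sub ≠ [] := by
        intro hc; rw [hc] at hsublen; simp at hsublen; omega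
      have hmidA : PySem.Int.floordiv (high + low) 2 = (high + low) / 2 :=
        PySem.Int.floordiv_eq_ediv_of_pos (by omega)
      have hmidB : PySem.Int.floordiv ((sub.length : Int) - 1) 2 = ((sub.length : Int) - 1) / 2 :=
        PySem.Int.floordiv_eq_ediv_of_pos (by omega)
      have hsubl' : (sub.length : Int) = high + 1 - low := by omega
      rw [pvA_loop, pvB_search, if_pos h, if_neg hsubne, hmidA, hmidB, hsubl']
      have hmids : (high + low) / 2 = low + (high + 1 - low - 1) / 2 := by omega
      rw [hmids]
      have hM0 : 0 ≤ (high + 1 - low - 1) / 2 := by omega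
      have hMlt : (high + 1 - low - 1) / 2 < (sub.length : Int) := by omega
      have hmid0 : (0 : Int) ≤ low + (high + 1 - low - 1) / 2 := by omega
      have hmidlen : low + (high + 1 - low - 1) / 2 < (a.length : Int) := by omega
      have hgetB : PySem.List.pyGet? sub ((high + 1 - low - 1) / 2)
          = some (sub[((high + 1 - low - 1) / 2).toNat]'(by omega)) :=
        PySem.List.pyGet?_eq_some_getElem sub hM0 hMlt
      have hgetA : PySem.List.pyGet? a (low + (high + 1 - low - 1) / 2)
          = some (a[(low + (high + 1 - low - 1) / 2).toNat]'(by omega)) :=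
        PySem.List.pyGet?_eq_some_getElem a hmid0 hmidlen
      have helem : sub[((high + 1 - low - 1) / 2).toNat]'(by omega)
          = a[(low + (high + 1 - low - 1) / 2).toNat]'(by omega) := by
        simp only [hsub, List.getElem_take, List.getElem_drop]
        congr 1
        omega
      rw [hgetA, hgetB, helem]
      dsimp only
      by_cases hlt : (a[(low + (high + 1 - low - 1) / 2).toNat]'(by omega)) < e
      · rw [if_pos hlt, if_pos hlt]
        have hslice : PySem.List.slice sub (some ((high + 1 - low - 1) / 2 + 1)) none
            = sub.drop ((high + 1 - low - 1) / 2 + 1).toNat := by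
          have hcast : (high + 1 - low - 1) / 2 + 1
              = ((((high + 1 - low - 1) / 2 + 1).toNat : Nat) : Int) := by omega
          rw [hcast, PySem.List.slice_from_natCast]
          congr 1
        rw [hslice]
        have hdrop : sub.drop ((high + 1 - low - 1) / 2 + 1).toNat
            = (a.drop (low + (high + 1 - low - 1) / 2 + 1).toNat).take
                (high + 1 - (low + (high + 1 - low - 1) / 2 + 1)).toNat := by
          rw [hsub, List.drop_take, List.drop_drop]
          congr 1
          · omega
          · congr 1; omega
        rw [hdrop]
        have hih := ih (high + 1 - (low + (high + 1 - low - 1) / 2 + 1)).toNat (by omega)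
          fa fb (low + (high + 1 - low - 1) / 2 + 1) high rfl (by omega) (by omega)
          (by omega) (by omega) hhl
        rw [hih]
      · rw [if_neg hlt, if_neg hlt]
        by_cases hgt : e < (a[(low + (high + 1 - low - 1) / 2).toNat]'(by omega))
        · rw [if_pos hgt, if_pos hgt]
          have hslice : PySem.List.slice sub none (some ((high + 1 - low - 1) / 2))
              = sub.take ((high + 1 - low - 1) / 2).toNat := by
            have hcast : (high + 1 - low - 1) / 2
                = ((((high + 1 - low - 1) / 2).toNat : Nat) : Int) := by omega
            rw [hcast, PySem.List.slice_to_natCast]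
            congr 1
          rw [hslice]
          have htake : sub.take ((high + 1 - low - 1) / 2).toNat
              = (a.drop low.toNat).take
                  ((low + (high + 1 - low - 1) / 2 - 1) + 1 - low).toNat := by
            rw [hsub, List.take_take]
            congr 1
            omega
          rw [htake]
          have hih := ih ((low + (high + 1 - low - 1) / 2 - 1) + 1 - low).toNat (by omega)
            fa fb low (low + (high + 1 - low - 1) / 2 - 1) rfl (by omega) (by omega)
            h0 (by omega) (by omega)
          rw [hih]
        · rw [if_neg hgt, if_neg hgt]
    · -- empty window: low > high
      rw [pvA_loop, pvB_search, if_neg h]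
      have hz : (a.drop low.toNat).take (high + 1 - low).toNat = [] := by
        have : (high + 1 - low).toNat = 0 := by omega
        rw [this]; simp
      rw [if_pos hz]

-- ===== VERDICT (by name: the statement is the Claim_ definition above) =====
theorem get_insert_index_binary_spec : Claim_equal_get_insert_index_binary := by
  intro a e _
  unfold Spec_get_insert_index_binary get_insert_index_binary get_insert_index_binary_alt
  have h := pvA_loop_eq_search a e ((a.length : Int) - 1 + 1 - 0).toNat (a.length + 1) (a.length + 1)
    0 ((a.length : Int) - 1) rfl (by omega) (by omega) (by omega) (by omega) (by omega)
  rw [h]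
  have hall : (a.drop (0 : Int).toNat).take ((a.length : Int) - 1 + 1 - 0).toNat = a := by
    simp
  rw [hall]
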